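-- pv_equiv track=rewrite | github.com/vicariousgreg/neuralNetworkMA | galg.py | evaluate
-- ===== SOURCE A (Python) =====
-- def evaluate(sequences, length, indices):
--     score = 0
--     for i in range(length):
--         counts = dict((("A", 0), ("C", 0), ("T", 0), ("G", 0)))
--         for seq,start in zip(sequences, indices):
--             counts[seq[start+i]] += 1
--         score += max(counts.values())
--     return score
-- ===== SOURCE B (Python) =====
-- def evaluate(sequences, length, indices):
--     # Sort-then-scan: per column, sort the characters and take the length of the
--     # longest run of equal characters, which on a sorted list is the maximum
--     # multiplicity -- no per-nucleotide counter dict is kept.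
--     total = 0
--     for i in range(length):
--         col = sorted(seq[start + i] for seq, start in zip(sequences, indices))
--         best = 0
--         run = 0
--         prev = None
--         for ch in col:
--             run = run + 1 if ch == prev else 1
--             prev = ch
--             if run > best:
--                 best = run
--         total += best
--     return total
-- ===== Notes on version B (the rewrite author's own statement) =====
-- stated objective: alternative
-- what changed: B replaces A's fixed-key dict counting per column with sort-then-scan: it sorts each column's characters and takes the longest run of equal characters (the maximum multiplicity of a sorted list), so no nucleotide counter is maintained at all.
import Mathlib
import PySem

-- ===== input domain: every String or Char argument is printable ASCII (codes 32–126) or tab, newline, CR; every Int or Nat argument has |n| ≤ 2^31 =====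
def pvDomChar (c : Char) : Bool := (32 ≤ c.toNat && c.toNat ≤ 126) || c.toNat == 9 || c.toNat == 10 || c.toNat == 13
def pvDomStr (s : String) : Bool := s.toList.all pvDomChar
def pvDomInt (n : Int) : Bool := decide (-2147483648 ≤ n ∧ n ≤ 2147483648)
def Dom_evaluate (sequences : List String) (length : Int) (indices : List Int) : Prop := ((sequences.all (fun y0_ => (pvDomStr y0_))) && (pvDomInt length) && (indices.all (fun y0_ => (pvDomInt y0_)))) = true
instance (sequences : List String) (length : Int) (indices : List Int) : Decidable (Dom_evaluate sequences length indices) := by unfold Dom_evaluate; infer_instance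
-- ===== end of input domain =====

-- B replaces A's per-column dict counting with sort-then-scan (the longest equal run
-- of the sorted column is its maximum multiplicity); equal wherever A returns (Pre_).

-- ===== PORT A =====
-- counts[seq[start+i]] += 1 : none = IndexError (bad index) or KeyError (char not a key)
def evalStepRow (i : Int) (d : PySem.Dict Char Int) (p : String × Int) : Option (PySem.Dict Char Int) :=
  match PySem.Str.pyGet? p.1 (p.2 + i) with
  | none => none
  | some c =>
    match d.get? c with
    | none => none
    | some v => some (d.insert c (v + 1))

-- the inner 'for seq,start in zip(...)' loop for one column i
def evalCol (rows : List (String × Int)) (i : Int) : Option (PySem.Dict Char Int) :=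
  rows.foldl (fun od p => od.bind (fun d => evalStepRow i d p))
    (some (PySem.Dict.ofList [('A', 0), ('C', 0), ('T', 0), ('G', 0)]))

def evaluate (sequences : List String) (length : Int) (indices : List Int) : Int :=
  match (PySem.List.pyRange 0 length 1).foldl
      (fun os i => os.bind (fun s => (evalCol (sequences.zip indices) i).bind (fun d =>
        (PySem.List.max? d.values (fun v => v)).map (fun m => s + m)))) (some 0) with
  | some s => s
  | none => 0   -- an exception was raised: outside Pre_, value arbitrary

-- ===== PORT B =====
-- the generator 'seq[start+i] for seq,start in zip(...)' ; none = IndexError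
def bGather (i : Int) : List (String × Int) → Option (List Char)
  | [] => some []
  | p :: rest =>
    match PySem.Str.pyGet? p.1 (p.2 + i) with
    | none => none
    | some c => (bGather i rest).map (fun cs => c :: cs)

-- the run-length scan: run = run+1 if ch == prev else 1; prev = ch; if run > best: best = run
def bScan : List Char → Option Char → Int → Int → Int
  | [], _, _, best => best
  | ch :: rest, prev, run, best =>
    let run' := if some ch == prev then run + 1 else 1
    bScan rest (some ch) run' (if run' > best then run' else best)

def evaluate_alt (sequences : List String) (length : Int) (indices : List Int) : Int :=
  match (PySem.List.pyRange 0 length 1).foldl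
      (fun ot i => ot.bind (fun t => (bGather i (sequences.zip indices)).map
        (fun cs => t + bScan (PySem.List.sorted cs (fun x => x) false) none 0 0))) (some 0) with
  | some s => s
  | none => 0   -- IndexError in the generator: outside Pre_, value arbitrary

-- ===== PRECONDITION & SPEC =====
-- seq[start+i] is in range and names one of the four keys A/C/T/G
def okAt (p : String × Int) (i : Int) : Bool :=
  (PySem.Str.pyGet? p.1 (p.2 + i)).any (fun ch => (['A', 'C', 'T', 'G'] : List Char).contains ch)

-- Pre_ excludes exactly the inputs on which A raises: an out-of-range access (IndexError)
-- or an accessed character outside "ACTG" (KeyError). The two bound conjuncts are implied by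
-- the okAt quantifier; they only let 'decide' refuse a huge window without enumerating it.
def Pre_evaluate (sequences : List String) (length : Int) (indices : List Int) : Prop :=
  ∀ p ∈ sequences.zip indices,
    length ≤ 0 ∨ (-(PySem.Str.len p.1) ≤ p.2 ∧ p.2 + length ≤ PySem.Str.len p.1 ∧
      ∀ i ∈ PySem.List.pyRange 0 length 1, okAt p i = true)

instance (sequences : List String) (length : Int) (indices : List Int) : Decidable (Pre_evaluate sequences length indices) := by unfold Pre_evaluate; infer_instance

def pvWitness_evaluate : List String × Int × List Int := (["ACT", "AAT"], 2, [0, 1])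

def Spec_evaluate (sequences : List String) (length : Int) (indices : List Int) (out : Int) : Prop := out = evaluate_alt sequences length indices
instance (sequences : List String) (length : Int) (indices : List Int) (out : Int) : Decidable (Spec_evaluate sequences length indices out) := by unfold Spec_evaluate; infer_instance

-- ===== CLAIM (what is proved, stated in full; the proofs are below) =====
def Claim_equal_evaluate : Prop := ∀ (sequences : List String) (length : Int) (indices : List Int), Dom_evaluate sequences length indices → Pre_evaluate sequences length indices → Spec_evaluate sequences length indices (evaluate sequences length indices)

-- ===== LEMMAS AND PROOFS =====

-- the character at column i of row p (meaningful whenever the access succeeds)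
def charOf (p : String × Int) (i : Int) : Char := (PySem.Str.pyGet? p.1 (p.2 + i)).getD 'A'

-- the 4-key dict A maintains: keys always exactly A,C,T,G in this order
def D4 (a c t g : Int) : PySem.Dict Char Int := PySem.Dict.mk [('A', a), ('C', c), ('T', t), ('G', g)]

theorem D4_values (a c t g : Int) : (D4 a c t g).values = [a, c, t, g] := rfl

theorem D4_congr {a c t g a' c' t' g' : Int} (h1 : a = a') (h2 : c = c') (h3 : t = t')
    (h4 : g = g') : D4 a c t g = D4 a' c' t' g' := by subst h1 h2 h3 h4; rfl

-- A's inner row loop over one column accumulates the four character counts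
theorem evalCol_eq (i : Int) (rows : List (String × Int)) :
    ∀ (a c t g : Int), (∀ p ∈ rows, okAt p i = true) →
    rows.foldl (fun od p => od.bind (fun d => evalStepRow i d p)) (some (D4 a c t g)) =
      some (D4 (a + ((rows.map (fun p => charOf p i)).count 'A' : Int))
               (c + ((rows.map (fun p => charOf p i)).count 'C' : Int))
               (t + ((rows.map (fun p => charOf p i)).count 'T' : Int))
               (g + ((rows.map (fun p => charOf p i)).count 'G' : Int))) := by
  induction rows with
  | nil =>
    intro a c t g _
    refine congrArg some (D4_congr ?_ ?_ ?_ ?_) <;>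
      simp only [List.map_nil, List.count_nil] <;> omega
  | cons p rest ih =>
    intro a c t g h
    have hp := h p (by simp)
    unfold okAt at hp
    cases hch : PySem.Str.pyGet? p.1 (p.2 + i) with
    | none => rw [hch] at hp; simp at hp
    | some ch =>
      rw [hch] at hp
      replace hp : ch = 'A' ∨ ch = 'C' ∨ ch = 'T' ∨ ch = 'G' := by
        have hm : ch ∈ (['A', 'C', 'T', 'G'] : List Char) := by
          rw [← List.contains_iff_mem]; exact hp
        simpa using hm
      have hch2 : PySem.List.pyGet? p.1.toList (p.2 + i) = some ch := hch
      have hchar : charOf p i = ch := by simp [charOf, hch2]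
      have htail : ∀ q ∈ rest, okAt q i = true := fun q hq => h q (by simp [hq])
      rw [List.foldl_cons]
      rcases hp with h1 | h1 | h1 | h1 <;> subst h1
      · have hstep : Option.bind (some (D4 a c t g)) (fun d => evalStepRow i d p) =
            some (D4 (a + 1) c t g) := by unfold evalStepRow; rw [hch]; rfl
        rw [hstep, ih (a + 1) c t g htail]
        refine congrArg some (D4_congr ?_ ?_ ?_ ?_) <;> simp [hchar] <;> try ring
      · have hstep : Option.bind (some (D4 a c t g)) (fun d => evalStepRow i d p) =
            some (D4 a (c + 1) t g) := by unfold evalStepRow; rw [hch]; rfl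
        rw [hstep, ih a (c + 1) t g htail]
        refine congrArg some (D4_congr ?_ ?_ ?_ ?_) <;> simp [hchar] <;> try ring
      · have hstep : Option.bind (some (D4 a c t g)) (fun d => evalStepRow i d p) =
            some (D4 a c (t + 1) g) := by unfold evalStepRow; rw [hch]; rfl
        rw [hstep, ih a c (t + 1) g htail]
        refine congrArg some (D4_congr ?_ ?_ ?_ ?_) <;> simp [hchar] <;> try ring
      · have hstep : Option.bind (some (D4 a c t g)) (fun d => evalStepRow i d p) =
            some (D4 a c t (g + 1)) := by unfold evalStepRow; rw [hch]; rfl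
        rw [hstep, ih a c t (g + 1) htail]
        refine congrArg some (D4_congr ?_ ?_ ?_ ?_) <;> simp [hchar] <;> try ring

-- the canonical per-column value: B's own expression for column i
def colVal (rows : List (String × Int)) (i : Int) : Int :=
  bScan (PySem.List.sorted (rows.map (fun p => charOf p i)) (fun x => x) false) none 0 0

-- run-length scan through a block of the char it is already running on
theorem bScan_rep_same (ch : Char) (n : Nat) :
    ∀ (rest : List Char) (run best : Int), run ≤ best →
    bScan (List.replicate n ch ++ rest) (some ch) run best =
      bScan rest (some ch) (run + n) (max best (run + n)) := by
  induction n with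
  | zero =>
    intro rest run best h
    simp [max_eq_left h]
  | succ n ih =>
    intro rest run best h
    rw [List.replicate_succ, List.cons_append]
    show bScan (List.replicate n ch ++ rest) (some ch)
        (if some ch == some ch then run + 1 else 1)
        (if (if some ch == some ch then run + 1 else 1) > best
         then (if some ch == some ch then run + 1 else 1) else best) = _
    simp only [BEq.rfl, if_true]
    have hb : (if run + 1 > best then run + 1 else best) = max best (run + 1) := by
      split <;> omega
    rw [hb, ih rest (run + 1) (max best (run + 1)) (le_max_right _ _)]
    congr 1 <;> push_cast <;> omega

-- run-length scan through a fresh block (previous char differs)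
theorem bScan_block (ch : Char) (n : Nat) (rest : List Char) (prev : Option Char)
    (run best : Int) (hrb : 0 ≤ run ∧ run ≤ best) (hne : prev ≠ some ch) :
    bScan (List.replicate n ch ++ rest) prev run best =
      bScan rest (if n = 0 then prev else some ch) (if n = 0 then run else (n : Int))
        (max best n) := by
  cases n with
  | zero => simp [le_trans hrb.1 hrb.2]
  | succ n =>
    rw [List.replicate_succ, List.cons_append]
    show bScan (List.replicate n ch ++ rest) (some ch)
        (if some ch == prev then run + 1 else 1)
        (if (if some ch == prev then run + 1 else 1) > best
         then (if some ch == prev then run + 1 else 1) else best) = _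
    have hbeq : (some ch == prev) = false := by
      cases prev with
      | none => rfl
      | some c => simp; intro h; exact hne (by rw [h])
    simp only [hbeq, Bool.false_eq_true, if_false]
    have hb : (if 1 > best then 1 else best) = max best 1 := by split <;> omega
    rw [hb, bScan_rep_same ch n rest 1 (max best 1) (le_max_right _ _)]
    simp only [Nat.add_eq_zero, Nat.succ_ne_zero, if_false]
    congr 1 <;> push_cast <;> omega

-- existential form of the block step, convenient for chaining
theorem bScan_block' (ch : Char) (n : Nat) (rest : List Char) (prev : Option Char)
    (run best : Int) (h0 : 0 ≤ run) (h1 : run ≤ best) (hne : prev ≠ some ch) :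
    ∃ prev' run', (prev' = prev ∨ prev' = some ch) ∧ 0 ≤ run' ∧ run' ≤ max best n ∧
      bScan (List.replicate n ch ++ rest) prev run best = bScan rest prev' run' (max best n) := by
  rw [bScan_block ch n rest prev run best ⟨h0, h1⟩ hne]
  by_cases hn : n = 0
  · subst hn
    exact ⟨prev, run, Or.inl rfl, h0, le_trans h1 (le_max_left _ _), by simp⟩
  · exact ⟨some ch, (n : Int), Or.inr rfl, Int.natCast_nonneg n, le_max_right _ _, by simp [hn]⟩

-- the scan over the four sorted blocks is the maximum multiplicity
theorem bScan_blocks (a c g t : Nat) :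
    bScan (List.replicate a 'A' ++ (List.replicate c 'C' ++ (List.replicate g 'G' ++
        List.replicate t 'T'))) none 0 0 =
      max (max (max (a : Int) (c : Int)) (g : Int)) (t : Int) := by
  obtain ⟨p1, r1, hp1, h1a, h1b, e1⟩ :=
    bScan_block' 'A' a (List.replicate c 'C' ++ (List.replicate g 'G' ++ List.replicate t 'T'))
      none 0 0 le_rfl le_rfl (by simp)
  rw [e1]
  obtain ⟨p2, r2, hp2, h2a, h2b, e2⟩ :=
    bScan_block' 'C' c (List.replicate g 'G' ++ List.replicate t 'T') p1 r1 (max 0 a) h1a h1b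
      (by rcases hp1 with h | h <;> subst h <;> simp)
  rw [e2]
  obtain ⟨p3, r3, hp3, h3a, h3b, e3⟩ :=
    bScan_block' 'G' g (List.replicate t 'T') p2 r2 (max (max 0 a) c) h2a h2b
      (by rcases hp2 with h | h
          · subst h; rcases hp1 with h | h <;> subst h <;> simp
          · subst h; simp)
  rw [e3]
  obtain ⟨p4, r4, _, h4a, h4b, e4⟩ :=
    bScan_block' 'T' t [] p3 r3 (max (max (max 0 a) c) g) h3a h3b
      (by rcases hp3 with h | h
          · subst h
            rcases hp2 with h | h
            · subst h; rcases hp1 with h | h <;> subst h <;> simp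
            · subst h; simp
          · subst h; simp)
  rw [← List.append_nil (List.replicate t 'T'), e4]
  show max (max (max (max 0 (a : Int)) (c : Int)) (g : Int)) (t : Int) = _
  omega

-- members of the C/G/T tail of blocks
theorem mem_blocks_CGT {y : Char} {c g t : Nat}
    (hy : y ∈ List.replicate c 'C' ++ (List.replicate g 'G' ++ List.replicate t 'T')) :
    y = 'C' ∨ y = 'G' ∨ y = 'T' := by
  simp [List.mem_replicate] at hy; tauto

-- a column whose characters all lie in ACTG sorts into the four replicate blocks
theorem sorted_col_eq (col : List Char)
    (h : ∀ x ∈ col, x = 'A' ∨ x = 'C' ∨ x = 'T' ∨ x = 'G') :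
    PySem.List.sorted col (fun x => x) false =
      List.replicate (col.count 'A') 'A' ++ (List.replicate (col.count 'C') 'C' ++
        (List.replicate (col.count 'G') 'G' ++ List.replicate (col.count 'T') 'T')) := by
  apply PySem.List.sorted_id_eq_of_perm_of_pairwise
  · apply List.perm_iff_count.mpr
    intro x
    by_cases hA : x = 'A'
    · subst hA; simp [List.count_append, List.count_replicate]
    by_cases hC : x = 'C'
    · subst hC; simp [List.count_append, List.count_replicate]
    by_cases hG : x = 'G'
    · subst hG; simp [List.count_append, List.count_replicate]
    by_cases hT : x = 'T'
    · subst hT; simp [List.count_append, List.count_replicate]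
    · have hx : x ∉ col := fun hm => by rcases h x hm with h1 | h1 | h1 | h1 <;> simp_all
      simp [List.count_append, List.count_replicate, List.count_eq_zero.mpr hx,
        Ne.symm hA, Ne.symm hC, Ne.symm hG, Ne.symm hT]
  · refine List.pairwise_append.mpr ⟨?_, List.pairwise_append.mpr ⟨?_,
      List.pairwise_append.mpr ⟨?_, ?_, ?_⟩, ?_⟩, ?_⟩
    · simp [List.pairwise_replicate]
    · simp [List.pairwise_replicate]
    · simp [List.pairwise_replicate]
    · simp [List.pairwise_replicate]
    · intro x hx y hy
      rw [List.mem_replicate] at hx hy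
      rw [hx.2, hy.2]; decide
    · intro x hx y hy
      rw [List.mem_replicate] at hx
      rcases List.mem_append.mp hy with hy1 | hy1 <;> rw [List.mem_replicate] at hy1 <;>
        rw [hx.2, hy1.2] <;> decide
    · intro x hx y hy
      rw [List.mem_replicate] at hx
      rcases mem_blocks_CGT hy with rfl | rfl | rfl <;> rw [hx.2] <;> decide

-- the generator succeeds and yields the column's characters
theorem bGather_eq (i : Int) (rows : List (String × Int))
    (h : ∀ p ∈ rows, okAt p i = true) :
    bGather i rows = some (rows.map (fun p => charOf p i)) := by
  induction rows with
  | nil => rfl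
  | cons p rest ih =>
    have hp := h p (by simp)
    unfold okAt at hp
    cases hch : PySem.Str.pyGet? p.1 (p.2 + i) with
    | none => rw [hch] at hp; simp at hp
    | some ch =>
      have hch2 : PySem.List.pyGet? p.1.toList (p.2 + i) = some ch := hch
      simp [bGather, ih (fun q hq => h q (by simp [hq])), charOf, hch2]

-- A's column value (max of the dict's values) equals B's column value
theorem col_eq (rows : List (String × Int)) (i : Int) (h : ∀ p ∈ rows, okAt p i = true) :
    Option.bind (evalCol rows i) (fun d => PySem.List.max? d.values (fun v => v)) =
      some (colVal rows i) := by
  have hcol := evalCol_eq i rows 0 0 0 0 h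
  have hcol' : evalCol rows i =
      some (D4 (((rows.map (fun p => charOf p i)).count 'A' : Int))
               (((rows.map (fun p => charOf p i)).count 'C' : Int))
               (((rows.map (fun p => charOf p i)).count 'T' : Int))
               (((rows.map (fun p => charOf p i)).count 'G' : Int))) := by
    simpa [evalCol] using hcol
  rw [hcol']
  have hmem : ∀ x ∈ rows.map (fun p => charOf p i), x = 'A' ∨ x = 'C' ∨ x = 'T' ∨ x = 'G' := by
    intro x hx
    rcases List.mem_map.mp hx with ⟨p, hp, rfl⟩
    have := h p hp
    unfold okAt at this
    cases hch : PySem.Str.pyGet? p.1 (p.2 + i) with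
    | none => rw [hch] at this; simp at this
    | some ch =>
      rw [hch] at this
      have hm : ch ∈ (['A', 'C', 'T', 'G'] : List Char) := by
        rw [← List.contains_iff_mem]; exact this
      have hch2 : PySem.List.pyGet? p.1.toList (p.2 + i) = some ch := hch
      have : charOf p i = ch := by simp [charOf, hch2]
      rw [this]; simpa using hm
  unfold colVal
  rw [sorted_col_eq _ hmem, bScan_blocks]
  simp only [Option.bind_some]
  rw [D4_values, PySem.List.max?_id_cons]
  simp only [Option.some.injEq, List.foldl_cons, List.foldl_nil]
  omega

-- both outer folds over the columns compute the same running sum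
theorem A_fold (rows : List (String × Int)) :
    ∀ (is : List Int) (s : Int), (∀ i ∈ is, ∀ p ∈ rows, okAt p i = true) →
    is.foldl (fun os i => os.bind (fun s => (evalCol rows i).bind (fun d =>
        (PySem.List.max? d.values (fun v => v)).map (fun m => s + m)))) (some s)
      = some (s + (is.map (fun i => colVal rows i)).sum) := by
  intro is
  induction is with
  | nil => intro s _; simp
  | cons i rest ih =>
    intro s h
    rw [List.foldl_cons]
    have hc := col_eq rows i (fun p hp => h i (by simp) p hp)
    have hstep : Option.bind (some s) (fun s => (evalCol rows i).bind (fun d =>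
        (PySem.List.max? d.values (fun v => v)).map (fun m => s + m)))
        = some (s + colVal rows i) := by
      cases hcol : evalCol rows i with
      | none => rw [hcol] at hc; simp at hc
      | some d =>
        rw [hcol] at hc
        simp only [Option.bind_some] at hc ⊢
        rw [hc]
        rfl
    rw [hstep, ih (s + colVal rows i) (fun j hj p hp => h j (by simp [hj]) p hp)]
    simp [add_assoc]

theorem B_fold (rows : List (String × Int)) :
    ∀ (is : List Int) (s : Int), (∀ i ∈ is, ∀ p ∈ rows, okAt p i = true) →
    is.foldl (fun ot i => ot.bind (fun t => (bGather i rows).map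
        (fun cs => t + bScan (PySem.List.sorted cs (fun x => x) false) none 0 0))) (some s)
      = some (s + (is.map (fun i => colVal rows i)).sum) := by
  intro is
  induction is with
  | nil => intro s _; simp
  | cons i rest ih =>
    intro s h
    rw [List.foldl_cons]
    have hg := bGather_eq i rows (fun p hp => h i (by simp) p hp)
    have hstep : Option.bind (some s) (fun t => (bGather i rows).map
        (fun cs => t + bScan (PySem.List.sorted cs (fun x => x) false) none 0 0))
        = some (s + colVal rows i) := by
      simp only [Option.bind_some, hg, Option.map_some]
      rfl
    rw [hstep, ih (s + colVal rows i) (fun j hj p hp => h j (by simp [hj]) p hp)]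
    simp [add_assoc]

-- ===== VERDICT (by name: the statement is the Claim_ definition above) =====
theorem evaluate_spec : Claim_equal_evaluate := by
  intro sequences length indices _ hpre
  unfold Spec_evaluate
  have hok : ∀ i ∈ PySem.List.pyRange 0 length 1, ∀ p ∈ sequences.zip indices,
      okAt p i = true := by
    intro i hi p hp
    rcases PySem.List.mem_pyRange_one.mp hi with ⟨h0, h1⟩
    rcases hpre p hp with hneg | ⟨_, _, hwin⟩
    · omega
    · exact hwin i hi
  unfold evaluate evaluate_alt
  rw [A_fold (sequences.zip indices) (PySem.List.pyRange 0 length 1) 0 hok]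
  rw [B_fold (sequences.zip indices) (PySem.List.pyRange 0 length 1) 0 hok]
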